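-- pv_equiv track=rewrite | github.com/reversebutterfly/sam2-pre-new | memshield/hiera_features.py | build_polish_to_insert_k_map
-- ===== SOURCE A (Python) =====
-- from typing import Any, Callable, Dict, Iterable, List, Optional, Sequence, Tuple
--
-- def build_polish_to_insert_k_map(
--     polish_frame_ids_proc: Sequence[int],
--     W_attacked: Sequence[int],
-- ) -> Dict[int, int]:
--     """For each polish frame `t` (processed-space), return `k` such that
--     `W_attacked[k]` is the most recent insert ≤ t.
--
--     Insert positions themselves get `k = (their position in W_attacked sorted)`.
--     Pre-first-insert frames get `k = -1` (caller should skip).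
--     """
--     W_sorted = sorted(int(w) for w in W_attacked)
--     out: Dict[int, int] = {}
--     for t in polish_frame_ids_proc:
--         t = int(t)
--         k_cover = -1
--         for k, w in enumerate(W_sorted):
--             if w <= t:
--                 k_cover = k
--             else:
--                 break
--         out[t] = k_cover
--     return out
-- ===== SOURCE B (Python) =====
-- def build_polish_to_insert_k_map(polish_frame_ids_proc, W_attacked):
--     """For each polish frame t, k such that W_attacked[k] (sorted) is the most
--     recent insert <= t; -1 before the first insert.  Binary search instead of
--     A's linear scan, and each distinct t is solved once."""
--     W_sorted = sorted(int(w) for w in W_attacked)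
--     n = len(W_sorted)
--     out = {}
--     for t in polish_frame_ids_proc:
--         t = int(t)
--         if t in out:
--             continue
--         # bisect_right by hand (no extra imports): first index with W_sorted[i] > t
--         lo, hi = 0, n
--         while lo < hi:
--             mid = (lo + hi) // 2
--             if W_sorted[mid] <= t:
--                 lo = mid + 1
--             else:
--                 hi = mid
--         out[t] = lo - 1
--     return out
-- ===== Notes on version B (the rewrite author's own statement) =====
-- stated objective: faster
-- what changed: Replaces A's per-frame linear scan of the sorted insert list by a binary search (bisect_right - 1) and computes each distinct frame id only once (a repeated id would overwrite the dict entry with the same value anyway).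
import Mathlib
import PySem

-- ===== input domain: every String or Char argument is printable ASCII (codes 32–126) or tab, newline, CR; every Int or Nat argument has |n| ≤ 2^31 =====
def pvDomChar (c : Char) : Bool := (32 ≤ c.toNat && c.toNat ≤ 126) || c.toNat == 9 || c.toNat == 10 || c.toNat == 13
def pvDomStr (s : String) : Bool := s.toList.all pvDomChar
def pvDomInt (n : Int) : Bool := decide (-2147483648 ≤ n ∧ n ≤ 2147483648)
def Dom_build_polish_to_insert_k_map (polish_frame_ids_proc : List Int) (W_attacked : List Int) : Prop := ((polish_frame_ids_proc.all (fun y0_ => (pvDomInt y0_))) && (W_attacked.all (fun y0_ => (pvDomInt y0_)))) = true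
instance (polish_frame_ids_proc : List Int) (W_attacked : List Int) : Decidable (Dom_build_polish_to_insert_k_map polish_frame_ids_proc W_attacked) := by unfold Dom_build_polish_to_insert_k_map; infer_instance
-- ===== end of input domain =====

-- B replaces A's per-frame linear scan by a binary search over the sorted insert
-- positions and computes each distinct frame id once; return values are equal.

-- ===== PORT A =====
-- inner 'for k, w in enumerate(W_sorted): if w <= t: k_cover = k else: break'
def pvAInner (t : Int) : List Int → Nat → Int → Int
  | [], _, kc => kc
  | w :: rest, k, kc => if w ≤ t then pvAInner t rest (k + 1) (k : Int) else kc

def build_polish_to_insert_k_map (polish_frame_ids_proc : List Int) (W_attacked : List Int) : List (Int × Int) :=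
  let W_sorted := PySem.List.sorted W_attacked (fun x => x) false
  (polish_frame_ids_proc.foldl
    (fun out t => out.insert t (pvAInner t W_sorted 0 (-1)))
    (PySem.Dict.empty : PySem.Dict Int Int)).items

-- ===== PORT B =====
-- Source B's hand-written lo/hi loop is exactly bisect_right's loop; PySem.List.bisectRight is that loop.
def build_polish_to_insert_k_map_alt (polish_frame_ids_proc : List Int) (W_attacked : List Int) : List (Int × Int) :=
  let W_sorted := PySem.List.sorted W_attacked (fun x => x) false
  (polish_frame_ids_proc.foldl
    (fun out t =>
      if out.contains t then out
      else out.insert t ((PySem.List.bisectRight W_sorted t : Int) - 1))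
    (PySem.Dict.empty : PySem.Dict Int Int)).items

-- ===== PRECONDITION & SPEC =====
def Spec_build_polish_to_insert_k_map (polish_frame_ids_proc : List Int) (W_attacked : List Int) (out : List (Int × Int)) : Prop := out = build_polish_to_insert_k_map_alt polish_frame_ids_proc W_attacked
instance (polish_frame_ids_proc : List Int) (W_attacked : List Int) (out : List (Int × Int)) : Decidable (Spec_build_polish_to_insert_k_map polish_frame_ids_proc W_attacked out) := by unfold Spec_build_polish_to_insert_k_map; infer_instance

-- ===== CLAIM (what is proved, stated in full; the proofs are below) =====
def Claim_equal_build_polish_to_insert_k_map : Prop := ∀ (polish_frame_ids_proc : List Int) (W_attacked : List Int), Dom_build_polish_to_insert_k_map polish_frame_ids_proc W_attacked → Spec_build_polish_to_insert_k_map polish_frame_ids_proc W_attacked (build_polish_to_insert_k_map polish_frame_ids_proc W_attacked)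

-- ===== LEMMAS AND PROOFS =====

-- A's scan returns (number of leading elements ≤ t) - 1, offset by the running index.
lemma pvAInner_eq (t : Int) : ∀ (ws : List Int) (k : Nat),
    pvAInner t ws k ((k : Int) - 1)
      = (k : Int) + ((ws.takeWhile (fun w => decide (w ≤ t))).length : Int) - 1 := by
  intro ws
  induction ws with
  | nil => intro k; simp [pvAInner]
  | cons w rest ih =>
    intro k
    by_cases h : w ≤ t
    · have hrec := ih (k + 1)
      have e1 : ((k + 1 : Nat) : Int) - 1 = (k : Int) := by push_cast; ring
      rw [e1] at hrec
      rw [show pvAInner t (w :: rest) k ((k : Int) - 1)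
            = if w ≤ t then pvAInner t rest (k + 1) (k : Int) else ((k : Int) - 1) from rfl,
          if_pos h, hrec, List.takeWhile_cons_of_pos (by simpa using h)]
      simp only [List.length_cons]; push_cast; ring
    · rw [show pvAInner t (w :: rest) k ((k : Int) - 1)
            = if w ≤ t then pvAInner t rest (k + 1) (k : Int) else ((k : Int) - 1) from rfl,
          if_neg h, List.takeWhile_cons_of_neg (by simpa using h)]
      simp

-- the takeWhile length is pinned down by the bisectRight brackets
lemma takeWhile_length_eq {p : Int → Bool} : ∀ (ws : List Int) (r : Nat),
    r ≤ ws.length →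
    (∀ j (hj : j < ws.length), j < r → p ws[j]) →
    (∀ j (hj : j < ws.length), r ≤ j → ¬ p ws[j]) →
    (ws.takeWhile p).length = r := by
  intro ws
  induction ws with
  | nil => intro r hr _ _; simp at hr ⊢; omega
  | cons w rest ih =>
    intro r hr h1 h2
    cases r with
    | zero =>
      have hw := h2 0 (by simp) (Nat.zero_le 0)
      simp only [List.getElem_cons_zero] at hw
      simp [List.takeWhile_cons_of_neg hw]
    | succ r' =>
      have hw : p w := by simpa using h1 0 (by simp) (Nat.succ_pos r')
      have hrest : (rest.takeWhile p).length = r' := by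
        apply ih r' (by simpa using hr)
        · intro j hj hjr
          simpa using h1 (j + 1) (by simpa using hj) (by omega)
        · intro j hj hjr
          simpa using h2 (j + 1) (by simpa using hj) (by omega)
      simp [List.takeWhile_cons_of_pos hw, hrest]

lemma bisectRight_eq_takeWhile (ws : List Int) (t : Int)
    (hs : ws.Pairwise (· ≤ ·)) :
    (ws.takeWhile (fun w => decide (w ≤ t))).length = PySem.List.bisectRight ws t := by
  obtain ⟨h0, h1, h2⟩ := PySem.List.bisectRight_spec ws t hs
  exact takeWhile_length_eq ws _ h0
    (fun j hj hjr => by simpa using h1 j hj hjr)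
    (fun j hj hjr => by simpa using h2 j hj hjr)

-- hence the two per-frame values coincide on the sorted list
lemma pvVal_eq (ws : List Int) (t : Int) (hs : ws.Pairwise (· ≤ ·)) :
    pvAInner t ws 0 (-1) = (PySem.List.bisectRight ws t : Int) - 1 := by
  have h := pvAInner_eq t ws 0
  simp only [Nat.cast_zero, zero_sub, zero_add] at h
  rw [h, bisectRight_eq_takeWhile ws t hs]

-- re-inserting the value a key already holds leaves the dict unchanged
lemma insert_get?_self (d : PySem.Dict Int Int) (k w : Int)
    (hnd : d.keys.Nodup) (h : d.get? k = some w) : d.insert k w = d := by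
  apply PySem.Dict.ext
  have hc : d.contains k = true := by
    rw [PySem.Dict.contains_eq_isSome_get?, h]; rfl
  rw [PySem.Dict.items_insert_of_contains d w hc]
  conv_rhs => rw [← List.map_id d.items]
  apply List.map_congr_left
  intro q hq
  by_cases hk : q.1 = k
  · have hg : d.get? q.1 = some q.2 := PySem.Dict.get?_of_mem_items d (by exact hq) hnd
    rw [hk] at hg
    rw [h] at hg
    have : q = (k, w) := by
      cases q; simp_all
    simp [this]
  · simp [hk]

-- the two folds agree once every stored value is the canonical one
lemma fold_eq (v : Int → Int) : ∀ (p : List Int) (d : PySem.Dict Int Int),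
    d.keys.Nodup → (∀ k x, d.get? k = some x → x = v k) →
    p.foldl (fun out t => out.insert t (v t)) d
      = p.foldl (fun out t => if out.contains t then out else out.insert t (v t)) d := by
  intro p
  induction p with
  | nil => intro d _ _; rfl
  | cons t rest ih =>
    intro d hnd hv
    simp only [List.foldl_cons]
    by_cases hc : d.contains t = true
    · rw [if_pos hc]
      have hg : (d.get? t).isSome := by rw [← PySem.Dict.contains_eq_isSome_get?, hc]
      obtain ⟨x, hx⟩ := Option.isSome_iff_exists.mp hg
      have hxv := hv t x hx
      rw [hxv] at hx
      rw [insert_get?_self d t (v t) hnd hx]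
      exact ih d hnd hv
    · rw [if_neg hc]
      apply ih
      · exact PySem.Dict.nodup_keys_insert d t (v t) hnd
      · intro k x hx
        rw [PySem.Dict.get?_insert] at hx
        by_cases hk : k = t
        · rw [if_pos hk] at hx
          rw [(Option.some.inj hx).symm, hk]
        · rw [if_neg hk] at hx
          exact hv k x hx

-- ===== VERDICT (by name: the statement is the Claim_ definition above) =====
theorem build_polish_to_insert_k_map_spec : Claim_equal_build_polish_to_insert_k_map := by
  intro p W _
  unfold Spec_build_polish_to_insert_k_map build_polish_to_insert_k_map build_polish_to_insert_k_map_alt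
  have hs : (PySem.List.sorted W (fun x => x) false).Pairwise (· ≤ ·) :=
    PySem.List.sorted_pairwise W (fun x => x)
  simp only
  rw [show (fun (out : PySem.Dict Int Int) t => out.insert t (pvAInner t (PySem.List.sorted W (fun x => x) false) 0 (-1)))
        = (fun out t => out.insert t ((PySem.List.bisectRight (PySem.List.sorted W (fun x => x) false) t : Int) - 1)) from
      funext fun out => funext fun t => by rw [pvVal_eq _ t hs]]
  rw [fold_eq _ p PySem.Dict.empty PySem.Dict.nodup_keys_empty
      (fun k x hx => by rw [PySem.Dict.get?_empty] at hx; cases hx)]
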